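-- pv_equiv track=rewrite | github.com/XCoret/R2-MINO | code/TEST.py | getrepeatedIndex
-- ===== SOURCE A (Python) =====
-- def getrepeatedIndex(possibleTokens):
--     repeaters = []
--     iteration = 0
--     for check in possibleTokens:
--         iteration2 = 0
--         for compare in possibleTokens:
--             if iteration != iteration2:
--                 if check[1][0] == compare[1][0] or check[1][0] == compare[1][1]:
--                     repeaters.append([iteration, check[1][0], (check[1][0] + check[1][1])])
--                 elif check[1][1] == compare[1][0] or check[1][1] == compare[1][1]:
--                     repeaters.append([iteration, check[1][1],(check[1][0] + check[1][1])])
--             iteration2 += 1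
--         iteration += 1
--     return repeaters
-- ===== SOURCE B (Python) =====
-- def getrepeatedIndex(possibleTokens):
--     # Index: value -> increasing list of token indices j with value in {a_j, b_j}
--     posns = {}
--     for j, (_, (a, b)) in enumerate(possibleTokens):
--         posns.setdefault(a, []).append(j)
--         if b != a:
--             posns.setdefault(b, []).append(j)
--     out = []
--     for i, (_, (a, b)) in enumerate(possibleTokens):
--         s = a + b
--         e1 = [i, a, s]
--         e2 = [i, b, s]
--         l1 = posns.get(a, [])
--         l2 = posns.get(b, []) if b != a else []
--         p = q = 0
--         # merge the two sorted index lists; on a tie branch 1 wins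
--         while p < len(l1) or q < len(l2):
--             if q == len(l2):
--                 j = l1[p]; p += 1; e = e1
--             elif p == len(l1):
--                 j = l2[q]; q += 1; e = e2
--             elif l1[p] < l2[q]:
--                 j = l1[p]; p += 1; e = e1
--             elif l2[q] < l1[p]:
--                 j = l2[q]; q += 1; e = e2
--             else:
--                 j = l1[p]; p += 1; q += 1; e = e1
--             if j != i:
--                 out.append(list(e))
--     return out
-- ===== Notes on version B (the rewrite author's own statement) =====
-- stated objective: faster
-- what changed: Replaced A's quadratic all-pairs nested scan by a single pass that builds a value-to-sorted-index-list hash map and then, per token, merges its two matching index lists in order (output-sensitive).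
import Mathlib
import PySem

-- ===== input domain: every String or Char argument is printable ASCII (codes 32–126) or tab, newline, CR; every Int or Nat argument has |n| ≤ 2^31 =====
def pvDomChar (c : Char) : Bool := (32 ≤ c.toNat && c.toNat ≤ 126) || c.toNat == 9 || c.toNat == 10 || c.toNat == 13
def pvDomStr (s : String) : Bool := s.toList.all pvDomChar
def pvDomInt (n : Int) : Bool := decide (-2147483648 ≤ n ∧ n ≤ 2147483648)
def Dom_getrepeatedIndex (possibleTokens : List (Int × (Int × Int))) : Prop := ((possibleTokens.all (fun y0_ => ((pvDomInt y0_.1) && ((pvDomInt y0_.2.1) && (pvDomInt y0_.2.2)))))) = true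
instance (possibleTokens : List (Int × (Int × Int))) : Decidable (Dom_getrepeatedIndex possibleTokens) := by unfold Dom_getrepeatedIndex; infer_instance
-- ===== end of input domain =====

-- B replaces A's quadratic all-pairs scan by a value→index-list hash map plus an
-- ordered merge of the two matching index lists per token (output-sensitive, faster).

-- ===== PORT A =====
def getrepeatedIndex (possibleTokens : List (Int × (Int × Int))) : List (List Int) :=
  (possibleTokens.foldl (fun (st : List (List Int) × Int) check =>
    let inner := possibleTokens.foldl (fun (st2 : List (List Int) × Int) compare =>
      (if st.2 ≠ st2.2 then
         (if check.2.1 = compare.2.1 ∨ check.2.1 = compare.2.2 then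
            st2.1 ++ [[st.2, check.2.1, check.2.1 + check.2.2]]
          else if check.2.2 = compare.2.1 ∨ check.2.2 = compare.2.2 then
            st2.1 ++ [[st.2, check.2.2, check.2.1 + check.2.2]]
          else st2.1)
       else st2.1, st2.2 + 1)) (st.1, 0)
    (inner.1, st.2 + 1)) ([], (0 : Int))).1

-- ===== PORT B =====
-- two-pointer merge of the two sorted index lists (B's while loop, on suffixes)
def pvMerge (i : Int) (e1 e2 : List Int) : List Int → List Int → List (List Int)
  | j :: r1, [] => (if j ≠ i then [e1] else []) ++ pvMerge i e1 e2 r1 []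
  | [], j :: r2 => (if j ≠ i then [e2] else []) ++ pvMerge i e1 e2 [] r2
  | j1 :: r1, j2 :: r2 =>
      if j1 < j2 then (if j1 ≠ i then [e1] else []) ++ pvMerge i e1 e2 r1 (j2 :: r2)
      else if j2 < j1 then (if j2 ≠ i then [e2] else []) ++ pvMerge i e1 e2 (j1 :: r1) r2
      else (if j1 ≠ i then [e1] else []) ++ pvMerge i e1 e2 r1 r2
  | [], [] => []
  termination_by l1 l2 => l1.length + l2.length

-- the first loop of B: posns[v] = indices j with v ∈ {a_j, b_j}, in order
def pvBuild (possibleTokens : List (Int × (Int × Int))) : PySem.Dict Int (List Int) :=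
  (possibleTokens.foldl (fun (st : PySem.Dict Int (List Int) × Int) t =>
     let d1 := st.1.modify t.2.1 [] (· ++ [st.2])
     let d2 := if t.2.2 ≠ t.2.1 then d1.modify t.2.2 [] (· ++ [st.2]) else d1
     (d2, st.2 + 1)) (PySem.Dict.empty, (0 : Int))).1

def getrepeatedIndex_alt (possibleTokens : List (Int × (Int × Int))) : List (List Int) :=
  let posns := pvBuild possibleTokens
  (possibleTokens.foldl (fun (st : List (List Int) × Int) t =>
     let a := t.2.1
     let b := t.2.2
     let e1 := [st.2, a, a + b]
     let e2 := [st.2, b, a + b]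
     let l1 := posns.getD a []
     let l2 := if b ≠ a then posns.getD b [] else []
     (st.1 ++ pvMerge st.2 e1 e2 l1 l2, st.2 + 1)) ([], (0 : Int))).1

-- ===== PRECONDITION & SPEC =====
def Spec_getrepeatedIndex (possibleTokens : List (Int × (Int × Int))) (out : List (List Int)) : Prop := out = getrepeatedIndex_alt possibleTokens
instance (possibleTokens : List (Int × (Int × Int))) (out : List (List Int)) : Decidable (Spec_getrepeatedIndex possibleTokens out) := by unfold Spec_getrepeatedIndex; infer_instance

-- ===== CLAIM (what is proved, stated in full; the proofs are below) =====
def Claim_equal_getrepeatedIndex : Prop := ∀ (possibleTokens : List (Int × (Int × Int))), Dom_getrepeatedIndex possibleTokens → Spec_getrepeatedIndex possibleTokens (getrepeatedIndex possibleTokens)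

-- ===== LEMMAS AND PROOFS =====

-- enumerate with an Int counter
def pvEnum {α : Type} (j : Int) : List α → List (Int × α)
  | [] => []
  | t :: ts => (j, t) :: pvEnum (j + 1) ts

-- what one (i, check) contributes for one (j, compare)
def fA (i : Int) (check : Int × Int × Int) (x : Int × (Int × Int × Int)) : List (List Int) :=
  if i ≠ x.1 then
    (if check.2.1 = x.2.2.1 ∨ check.2.1 = x.2.2.2 then [[i, check.2.1, check.2.1 + check.2.2]]
     else if check.2.2 = x.2.2.1 ∨ check.2.2 = x.2.2.2 then [[i, check.2.2, check.2.1 + check.2.2]]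
     else [])
  else []

lemma foldl_enum {α : Type} (step : (List (List Int) × Int) → α → (List (List Int) × Int))
    (f : Int → α → List (List Int))
    (hstep : ∀ st t, step st t = (st.1 ++ f st.2 t, st.2 + 1)) :
    ∀ (ts : List α) (acc : List (List Int)) (j : Int),
      (ts.foldl step (acc, j)) = (acc ++ (pvEnum j ts).flatMap (fun x => f x.1 x.2), j + ts.length) := by
  intro ts
  induction ts with
  | nil => intro acc j; simp [pvEnum]
  | cons t ts ih =>
      intro acc j
      simp only [List.foldl_cons, hstep, ih, pvEnum, List.flatMap_cons, List.length_cons]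
      refine Prod.ext ?_ ?_
      · simp [List.append_assoc]
      · simp only []; push_cast; ring

lemma mem_pvEnum_fst_lt {α : Type} : ∀ (ts : List α) (j : Int) (x : Int × α),
    x ∈ pvEnum j ts → j ≤ x.1 := by
  intro ts
  induction ts with
  | nil => intro j x h; simp [pvEnum] at h
  | cons t ts ih =>
      intro j x h
      simp only [pvEnum, List.mem_cons] at h
      rcases h with h | h
      · simp [h]
      · have := ih (j + 1) x h; omega

lemma build_getD : ∀ (ts : List (Int × Int × Int)) (d : PySem.Dict Int (List Int)) (j v : Int),
    ((ts.foldl (fun (st : PySem.Dict Int (List Int) × Int) t =>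
       let d1 := st.1.modify t.2.1 [] (· ++ [st.2])
       let d2 := if t.2.2 ≠ t.2.1 then d1.modify t.2.2 [] (· ++ [st.2]) else d1
       (d2, st.2 + 1)) (d, j)).1).getD v []
    = d.getD v [] ++ (pvEnum j ts).filterMap
        (fun x => if v = x.2.2.1 ∨ v = x.2.2.2 then some x.1 else none) := by
  intro ts
  induction ts with
  | nil => intro d j v; simp [pvEnum]
  | cons t ts ih =>
      intro d j v
      simp only [List.foldl_cons, pvEnum, List.filterMap_cons]
      rw [ih]
      have hstep : ((if t.2.2 ≠ t.2.1 then (d.modify t.2.1 [] (· ++ [j])).modify t.2.2 [] (· ++ [j])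
                    else d.modify t.2.1 [] (· ++ [j])).getD v [])
          = d.getD v [] ++ (if v = t.2.1 ∨ v = t.2.2 then [j] else []) := by
        by_cases hba : t.2.2 = t.2.1
        · simp only [hba, ne_eq, not_true_eq_false, if_false]
          rw [PySem.Dict.getD_modify]
          by_cases hva : v = t.2.1 <;> simp [hva]
        · simp only [ne_eq, hba, not_false_eq_true, if_true]
          simp only [PySem.Dict.getD_modify]
          by_cases hvb : v = t.2.2 <;> by_cases hva : v = t.2.1
          · exact (hba (hvb.symm.trans hva)).elim
          · simp [hvb, hba]
          · simp [hva, show ¬ t.2.1 = t.2.2 from fun h => hba h.symm]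
          · simp [hvb, hva]
      simp only [hstep]
      by_cases hc : v = t.2.1 ∨ v = t.2.2 <;> simp [hc, List.append_assoc]

lemma merge_tie (i : Int) (e1 e2 : List Int) (j : Int) (l1 l2 : List Int) :
    pvMerge i e1 e2 (j :: l1) (j :: l2) = (if j ≠ i then [e1] else []) ++ pvMerge i e1 e2 l1 l2 := by
  rw [pvMerge]
  simp

lemma merge_left (i : Int) (e1 e2 : List Int) (j : Int) (l1 l2 : List Int)
    (h2 : ∀ k ∈ l2, j < k) :
    pvMerge i e1 e2 (j :: l1) l2 = (if j ≠ i then [e1] else []) ++ pvMerge i e1 e2 l1 l2 := by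
  cases l2 with
  | nil => rw [pvMerge]
  | cons k r =>
      have hk : j < k := h2 k (List.mem_cons_self)
      rw [pvMerge]
      simp [hk]

lemma merge_right (i : Int) (e1 e2 : List Int) (j : Int) (l1 l2 : List Int)
    (h1 : ∀ k ∈ l1, j < k) :
    pvMerge i e1 e2 l1 (j :: l2) = (if j ≠ i then [e2] else []) ++ pvMerge i e1 e2 l1 l2 := by
  cases l1 with
  | nil => rw [pvMerge]
  | cons k r =>
      have hk : j < k := h1 k (List.mem_cons_self)
      rw [pvMerge]
      simp only [if_neg (by omega : ¬ k < j), if_pos hk]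

lemma merge_eq {α : Type} (i : Int) (e1 e2 : List Int) (q1 q2 : α → Prop)
    [DecidablePred q1] [DecidablePred q2] :
    ∀ (L : List (Int × α)), (L.map Prod.fst).Pairwise (· < ·) →
    pvMerge i e1 e2 (L.filterMap (fun x => if q1 x.2 then some x.1 else none))
                    (L.filterMap (fun x => if q2 x.2 then some x.1 else none))
    = L.flatMap (fun x => if i ≠ x.1 then
        (if q1 x.2 then [e1] else if q2 x.2 then [e2] else []) else []) := by
  intro L
  induction L with
  | nil => intro _; simp [pvMerge]
  | cons x L ih =>
      intro hpw
      simp only [List.map_cons, List.pairwise_cons] at hpw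
      obtain ⟨hlt, hpw'⟩ := hpw
      have hub : ∀ (q : α → Prop), ∀ _ : DecidablePred q,
          ∀ j ∈ L.filterMap (fun y => if q y.2 then some y.1 else none), x.1 < j := by
        intro q _ j hj
        rcases List.mem_filterMap.1 hj with ⟨y, hy, hyj⟩
        have hjy : j = y.1 := by by_cases h : q y.2 <;> simp [h] at hyj; omega
        subst hjy
        exact hlt y.1 (List.mem_map.2 ⟨y, hy, rfl⟩)
      simp only [List.filterMap_cons, List.flatMap_cons]
      rw [← ih hpw']
      by_cases h1 : q1 x.2
      · by_cases h2 : q2 x.2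
        · simp only [if_pos h1, if_pos h2]
          rw [merge_tie]
          by_cases hi : i = x.1
          · simp [hi]
          · simp [hi, show ¬ x.1 = i from fun h => hi h.symm]
        · simp only [if_pos h1, if_neg h2]
          rw [merge_left i e1 e2 x.1 _ _ (hub q2 inferInstance)]
          by_cases hi : i = x.1
          · simp [hi]
          · simp [hi, show ¬ x.1 = i from fun h => hi h.symm]
      · by_cases h2 : q2 x.2
        · simp only [if_neg h1, if_pos h2]
          rw [merge_right i e1 e2 x.1 _ _ (hub q1 inferInstance)]
          by_cases hi : i = x.1
          · simp [hi]
          · simp [hi, show ¬ x.1 = i from fun h => hi h.symm]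
        · simp only [if_neg h1, if_neg h2]
          by_cases hi : i = x.1 <;> simp [hi]

-- per token: B's merge equals A's inner scan
lemma per_token (ts : List (Int × Int × Int)) (i : Int) (check : Int × Int × Int) :
    pvMerge i [i, check.2.1, check.2.1 + check.2.2] [i, check.2.2, check.2.1 + check.2.2]
      ((pvBuild ts).getD check.2.1 [])
      (if check.2.2 ≠ check.2.1 then (pvBuild ts).getD check.2.2 [] else [])
    = (pvEnum 0 ts).flatMap (fA i check) := by
  have hpw : ((pvEnum (0 : Int) ts).map Prod.fst).Pairwise (· < ·) := by
    have : ∀ (j : Int), ((pvEnum j ts).map Prod.fst).Pairwise (· < ·) := by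
      induction ts with
      | nil => intro j; simp [pvEnum]
      | cons t ts ih =>
          intro j
          simp only [pvEnum, List.map_cons, List.pairwise_cons]
          refine ⟨?_, ih (j + 1)⟩
          intro k hk
          rcases List.mem_map.1 hk with ⟨y, hy, rfl⟩
          have := mem_pvEnum_fst_lt ts (j + 1) y hy
          omega
    exact this 0
  have hb : ∀ v, (pvBuild ts).getD v []
      = (pvEnum 0 ts).filterMap (fun x => if v = x.2.2.1 ∨ v = x.2.2.2 then some x.1 else none) := by
    intro v
    have := build_getD ts PySem.Dict.empty 0 v
    simpa [pvBuild] using this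
  by_cases hba : check.2.2 = check.2.1
  · rw [if_neg (by simp [hba] : ¬ check.2.2 ≠ check.2.1), hb]
    have h := merge_eq (α := Int × Int × Int) i
        [i, check.2.1, check.2.1 + check.2.2] [i, check.2.2, check.2.1 + check.2.2]
        (fun cmp => check.2.1 = cmp.2.1 ∨ check.2.1 = cmp.2.2)
        (fun _ => False) (pvEnum 0 ts) hpw
    simp only [if_false] at h
    have hnil : (pvEnum (0:Int) ts).filterMap (fun _ : Int × (Int × Int × Int) => (none : Option Int)) = [] := by
      simp
    rw [hnil] at h
    refine h.trans ?_
    apply List.flatMap_congr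
    intro x hx
    unfold fA
    by_cases hi : i ≠ x.1 <;> by_cases hc : check.2.1 = x.2.2.1 ∨ check.2.1 = x.2.2.2 <;>
      simp_all
  · rw [if_pos hba, hb, hb]
    have h := merge_eq (α := Int × Int × Int) i
        [i, check.2.1, check.2.1 + check.2.2] [i, check.2.2, check.2.1 + check.2.2]
        (fun cmp => check.2.1 = cmp.2.1 ∨ check.2.1 = cmp.2.2)
        (fun cmp => check.2.2 = cmp.2.1 ∨ check.2.2 = cmp.2.2) (pvEnum 0 ts) hpw
    refine h.trans ?_
    apply List.flatMap_congr
    intro x hx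
    unfold fA
    rfl

-- ===== VERDICT (by name: the statement is the Claim_ definition above) =====
theorem getrepeatedIndex_spec : Claim_equal_getrepeatedIndex := by
  intro ts _
  unfold Spec_getrepeatedIndex getrepeatedIndex getrepeatedIndex_alt
  have hA : ∀ (check : Int × Int × Int) (i : Int) (acc : List (List Int)),
      (ts.foldl (fun (st2 : List (List Int) × Int) compare =>
        (if i ≠ st2.2 then
           (if check.2.1 = compare.2.1 ∨ check.2.1 = compare.2.2 then
              st2.1 ++ [[i, check.2.1, check.2.1 + check.2.2]]
            else if check.2.2 = compare.2.1 ∨ check.2.2 = compare.2.2 then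
              st2.1 ++ [[i, check.2.2, check.2.1 + check.2.2]]
            else st2.1)
         else st2.1, st2.2 + 1)) (acc, 0))
      = (acc ++ (pvEnum 0 ts).flatMap (fun x => fA i check x), (0 : Int) + ts.length) := by
    intro check i acc
    apply foldl_enum _ (fun j compare => fA i check (j, compare))
    intro st t
    unfold fA
    by_cases hi : i ≠ st.2 <;> split_ifs <;> simp_all
  have hOuter := foldl_enum
      (fun (st : List (List Int) × Int) check =>
        ((ts.foldl (fun (st2 : List (List Int) × Int) compare =>
          (if st.2 ≠ st2.2 then
             (if check.2.1 = compare.2.1 ∨ check.2.1 = compare.2.2 then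
                st2.1 ++ [[st.2, check.2.1, check.2.1 + check.2.2]]
              else if check.2.2 = compare.2.1 ∨ check.2.2 = compare.2.2 then
                st2.1 ++ [[st.2, check.2.2, check.2.1 + check.2.2]]
              else st2.1)
           else st2.1, st2.2 + 1)) (st.1, 0)).1, st.2 + 1))
      (fun i check => (pvEnum 0 ts).flatMap (fun x => fA i check x))
      (by
        intro st t
        have := hA t st.2 st.1
        -- the inner condition 'st.2 ≠ st2.2' is 'i ≠ st2.2' with i := st.2
        simp only [this])
      ts [] 0
  have hB := foldl_enum
      (fun (st : List (List Int) × Int) t =>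
        (st.1 ++ pvMerge st.2 [st.2, t.2.1, t.2.1 + t.2.2] [st.2, t.2.2, t.2.1 + t.2.2]
          ((pvBuild ts).getD t.2.1 [])
          (if t.2.2 ≠ t.2.1 then (pvBuild ts).getD t.2.2 [] else []), st.2 + 1))
      (fun i t => pvMerge i [i, t.2.1, t.2.1 + t.2.2] [i, t.2.2, t.2.1 + t.2.2]
          ((pvBuild ts).getD t.2.1 [])
          (if t.2.2 ≠ t.2.1 then (pvBuild ts).getD t.2.2 [] else []))
      (by intro st t; rfl) ts [] 0
  simp only [hOuter, hB, List.nil_append]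
  apply List.flatMap_congr
  intro x hx
  exact (per_token ts x.1 x.2).symm
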